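-- pv_equiv track=rewrite | github.com/kwendel/advent-of-code | 2023/day_06.py | find_losing
-- ===== SOURCE A (Python) =====
-- def find_losing(time_range, total_time, record) -> int:
--     losing = 0
--     for time in time_range:
--         distance = (total_time - time) * time
--         if distance <= record:
--             losing += 1
--         else:
--             break
--
--     return losing
-- ===== SOURCE B (Python) =====
-- def find_losing(time_range, total_time, record) -> int:
--     # Scan back-to-front with a reset accumulator: after processing position i,
--     # `losing` is the length of the losing run starting at i (0 whenever a
--     # winning time resets it).  At the end that is the losing prefix length.
--     losing = 0
--     for t in reversed(time_range):
--         losing = 0 if (total_time - t) * t > record else losing + 1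
--     return losing
-- ===== Notes on version B (the rewrite author's own statement) =====
-- stated objective: alternative
-- what changed: B replaces A's forward early-exit counting loop by a full back-to-front fold with a reset accumulator (losing run length starting at each position, reset to 0 at a winning time), whose final value is the losing prefix length.
import Mathlib
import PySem

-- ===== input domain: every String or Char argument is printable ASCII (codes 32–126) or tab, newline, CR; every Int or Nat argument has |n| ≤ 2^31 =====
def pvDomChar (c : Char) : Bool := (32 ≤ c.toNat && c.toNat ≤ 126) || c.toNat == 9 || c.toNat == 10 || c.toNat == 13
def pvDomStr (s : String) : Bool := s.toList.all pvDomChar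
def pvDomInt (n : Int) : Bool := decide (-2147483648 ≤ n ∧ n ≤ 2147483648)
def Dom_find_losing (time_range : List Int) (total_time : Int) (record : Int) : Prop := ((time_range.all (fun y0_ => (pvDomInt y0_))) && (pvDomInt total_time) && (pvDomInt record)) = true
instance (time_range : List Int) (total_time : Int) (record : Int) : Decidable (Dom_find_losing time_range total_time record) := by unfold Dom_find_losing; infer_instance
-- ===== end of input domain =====

-- B replaces A's forward early-exit counting loop by a full back-to-front fold with a
-- reset accumulator; objective: alternative, same cost.

-- ===== PORT A =====
-- loop with accumulator `losing`, incremented until the break condition fires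
def find_losing_loop (total_time : Int) (record : Int) (losing : Int) : List Int → Int
  | [] => losing
  | time :: rest =>
      if (total_time - time) * time ≤ record then
        find_losing_loop total_time record (losing + 1) rest
      else
        losing

def find_losing (time_range : List Int) (total_time : Int) (record : Int) : Int :=
  find_losing_loop total_time record 0 time_range

-- ===== PORT B =====
-- for t in reversed(time_range): losing = 0 if win else losing + 1
def find_losing_alt (time_range : List Int) (total_time : Int) (record : Int) : Int :=
  time_range.reverse.foldl
    (fun losing t => if (total_time - t) * t > record then 0 else losing + 1) 0

-- ===== PRECONDITION & SPEC =====
def Spec_find_losing (time_range : List Int) (total_time : Int) (record : Int) (out : Int) : Prop := out = find_losing_alt time_range total_time record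
instance (time_range : List Int) (total_time : Int) (record : Int) (out : Int) : Decidable (Spec_find_losing time_range total_time record out) := by unfold Spec_find_losing; infer_instance

-- ===== CLAIM (what is proved, stated in full; the proofs are below) =====
def Claim_equal_find_losing : Prop := ∀ (time_range : List Int) (total_time : Int) (record : Int), Dom_find_losing time_range total_time record → Spec_find_losing time_range total_time record (find_losing time_range total_time record)

-- ===== LEMMAS AND PROOFS =====
theorem alt_foldr (time_range : List Int) (total_time record : Int) :
    find_losing_alt time_range total_time record =
      time_range.foldr
        (fun t losing => if (total_time - t) * t > record then 0 else losing + 1) 0 := by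
  unfold find_losing_alt
  rw [List.foldl_reverse]

theorem loop_eq_foldr (total_time record : Int) (l : List Int) (acc : Int) :
    find_losing_loop total_time record acc l =
      acc + l.foldr (fun t losing => if (total_time - t) * t > record then 0 else losing + 1) 0 := by
  induction l generalizing acc with
  | nil => simp [find_losing_loop]
  | cons t rest ih =>
      simp only [find_losing_loop, List.foldr]
      by_cases h : (total_time - t) * t ≤ record
      · rw [if_pos h, if_neg (by omega), ih]; ring
      · rw [if_neg h, if_pos (by omega)]; ring

-- ===== VERDICT (by name: the statement is the Claim_ definition above) =====
theorem find_losing_spec : Claim_equal_find_losing := by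
  intro tr tt r _
  unfold Spec_find_losing find_losing
  rw [alt_foldr, loop_eq_foldr]; ring
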